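-- pv_equiv track=rewrite | github.com/solosage1/amm-challenge | scripts/amm-phase7-prompt-builder.py | select_hypothesis_gaps
-- ===== SOURCE A (Python) =====
-- from typing import Dict, List, Tuple
--
-- def select_hypothesis_gaps(state: Dict) -> List[Tuple[str, str]]:
--     """Prioritize hypothesis gaps to explore"""
--     # Identify which hypotheses have been under-explored
--     tested_hypotheses = {}
--     for entry in state['strategies_log']:
--         hyp_ids = entry.get('hypothesis_ids', [])
--         if isinstance(hyp_ids, list):
--             for hyp in hyp_ids:
--                 tested_hypotheses[hyp] = tested_hypotheses.get(hyp, 0) + 1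
--
--     # Priority order based on research backlog
--     all_gaps = [
--         ("H-001", "Fair price inference from arbitrage"),
--         ("H-002", "Post-arb tighten, post-retail widen"),
--         ("H-003", "Inventory-skewed asymmetric fees"),
--         ("H-004", "Volatility proxy via price changes"),
--         ("H-005", "Hysteresis/decay to avoid oscillation"),
--         ("H-006", "Trade-size reactive widening"),
--         ("GAP-A", "Fair price inference strategies"),
--         ("GAP-B", "Multi-regime adaptive fees"),
--         ("GAP-C", "Directional asymmetry with hysteresis"),
--         ("GAP-D", "Real-time volatility signaling"),
--         ("GAP-E", "Timestamp-level fee coherence"),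
--         ("GAP-F", "Cross-AMM retail volume inference"),
--         ("GAP-G", "Arb-informed price bands"),
--         ("GAP-H", "Entropy-based fee scheduling"),
--     ]
--
--     # Return least-tested gaps first
--     return sorted(all_gaps, key=lambda x: tested_hypotheses.get(x[0], 0))
-- ===== SOURCE B (Python) =====
-- from typing import Dict, List, Tuple
--
-- def select_hypothesis_gaps(state: Dict) -> List[Tuple[str, str]]:
--     """Prioritize hypothesis gaps to explore.
--
--     Different decomposition: instead of building a hypothesis->count dict and
--     calling sorted(), flatten the logged hypothesis ids into one list, key each
--     gap by flat.count(gap_id), and perform a stable counting/bucket sort: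
--     one pass fills count-keyed buckets (original order kept within a bucket),
--     then the buckets are concatenated in ascending count order.
--     """
--     flat = []
--     for entry in state['strategies_log']:
--         hyp_ids = entry.get('hypothesis_ids', [])
--         if isinstance(hyp_ids, list):
--             flat.extend(hyp_ids)
--
--     # Priority order based on research backlog (same table as parallel lists)
--     gap_ids = ["H-001", "H-002", "H-003", "H-004", "H-005", "H-006",
--                "GAP-A", "GAP-B", "GAP-C", "GAP-D", "GAP-E", "GAP-F",
--                "GAP-G", "GAP-H"]
--     gap_descs = ["Fair price inference from arbitrage",
--                  "Post-arb tighten, post-retail widen",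
--                  "Inventory-skewed asymmetric fees",
--                  "Volatility proxy via price changes",
--                  "Hysteresis/decay to avoid oscillation",
--                  "Trade-size reactive widening",
--                  "Fair price inference strategies",
--                  "Multi-regime adaptive fees",
--                  "Directional asymmetry with hysteresis",
--                  "Real-time volatility signaling",
--                  "Timestamp-level fee coherence",
--                  "Cross-AMM retail volume inference",
--                  "Arb-informed price bands",
--                  "Entropy-based fee scheduling"]
--     all_gaps = list(zip(gap_ids, gap_descs))
--
--     buckets = {}
--     top = 0
--     for gap in all_gaps:
--         c = flat.count(gap[0])
--         buckets.setdefault(c, []).append(gap)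
--         if c > top:
--             top = c
--
--     result = []
--     for k in range(top + 1):
--         result.extend(buckets.get(k, []))
--     return result
-- ===== Notes on version B (the rewrite author's own statement) =====
-- stated objective: alternative
-- what changed: A's hypothesis->count dict plus sorted() is replaced by flattening the logged ids into one list, keying each gap by flat.count(id), and a stable counting/bucket sort that fills count-keyed buckets in one pass and concatenates them in ascending count order.
import Mathlib
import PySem

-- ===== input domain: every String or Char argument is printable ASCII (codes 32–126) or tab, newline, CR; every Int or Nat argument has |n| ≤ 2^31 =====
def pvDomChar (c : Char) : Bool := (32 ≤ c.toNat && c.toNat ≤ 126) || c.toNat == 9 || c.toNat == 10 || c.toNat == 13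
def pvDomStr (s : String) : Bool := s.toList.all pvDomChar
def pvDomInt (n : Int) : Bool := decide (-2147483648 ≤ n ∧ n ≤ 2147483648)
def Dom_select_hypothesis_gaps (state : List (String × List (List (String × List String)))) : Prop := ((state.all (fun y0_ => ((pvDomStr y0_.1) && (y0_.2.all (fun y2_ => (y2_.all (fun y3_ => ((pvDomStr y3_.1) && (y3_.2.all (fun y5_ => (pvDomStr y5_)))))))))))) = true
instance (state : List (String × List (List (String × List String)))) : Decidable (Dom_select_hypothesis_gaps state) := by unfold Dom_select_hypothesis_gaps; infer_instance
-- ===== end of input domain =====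

-- B replaces A's count-dict + sorted() by a flattened id list, per-gap flat.count
-- keys, and a stable counting/bucket sort (objective: alternative decomposition;
-- equal return value proved below).

-- The fixed gap table, identical verbatim in both Pythons.
def pvAllGaps : List (String × String) := [
  ("H-001", "Fair price inference from arbitrage"),
  ("H-002", "Post-arb tighten, post-retail widen"),
  ("H-003", "Inventory-skewed asymmetric fees"),
  ("H-004", "Volatility proxy via price changes"),
  ("H-005", "Hysteresis/decay to avoid oscillation"),
  ("H-006", "Trade-size reactive widening"),
  ("GAP-A", "Fair price inference strategies"),
  ("GAP-B", "Multi-regime adaptive fees"),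
  ("GAP-C", "Directional asymmetry with hysteresis"),
  ("GAP-D", "Real-time volatility signaling"),
  ("GAP-E", "Timestamp-level fee coherence"),
  ("GAP-F", "Cross-AMM retail volume inference"),
  ("GAP-G", "Arb-informed price bands"),
  ("GAP-H", "Entropy-based fee scheduling")]

-- state['strategies_log']; the KeyError case (key absent) is excluded by Pre_,
-- the .getD [] is never reached inside Pre_.
def pvLog (state : List (String × List (List (String × List String)))) : List (List (String × List String)) :=
  ((PySem.Dict.mk state).get? "strategies_log").getD []

-- ===== PORT A =====
-- A's counting loop: for entry in log: for hyp in entry.get('hypothesis_ids', []):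
--   tested[hyp] = tested.get(hyp, 0) + 1
-- (the isinstance(hyp_ids, list) test is always true at this type)
def pvTested (log : List (List (String × List String))) : PySem.Dict String Int :=
  log.foldl (fun d entry =>
      ((PySem.Dict.mk entry).getD "hypothesis_ids" []).foldl
        (fun d hyp => d.insert hyp (d.getD hyp 0 + 1)) d)
    PySem.Dict.empty

def select_hypothesis_gaps (state : List (String × List (List (String × List String)))) : List (String × String) :=
  let tested := pvTested (pvLog state)
  PySem.List.sorted pvAllGaps (fun x => tested.getD x.1 0)

-- ===== PORT B =====
-- B writes the same backlog table as two parallel literal lists zipped together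
def pvGapIds : List String := ["H-001", "H-002", "H-003", "H-004", "H-005", "H-006",
  "GAP-A", "GAP-B", "GAP-C", "GAP-D", "GAP-E", "GAP-F", "GAP-G", "GAP-H"]
def pvGapDescs : List String := ["Fair price inference from arbitrage",
  "Post-arb tighten, post-retail widen",
  "Inventory-skewed asymmetric fees",
  "Volatility proxy via price changes",
  "Hysteresis/decay to avoid oscillation",
  "Trade-size reactive widening",
  "Fair price inference strategies",
  "Multi-regime adaptive fees",
  "Directional asymmetry with hysteresis",
  "Real-time volatility signaling",
  "Timestamp-level fee coherence",
  "Cross-AMM retail volume inference",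
  "Arb-informed price bands",
  "Entropy-based fee scheduling"]

def select_hypothesis_gaps_alt (state : List (String × List (List (String × List String)))) : List (String × String) :=
  -- flat = []; for entry in log: flat.extend(entry.get('hypothesis_ids', []))
  let flat := (pvLog state).foldl
      (fun acc entry => acc ++ (PySem.Dict.mk entry).getD "hypothesis_ids" []) []
  -- c = flat.count(gap[0]); buckets.setdefault(c, []).append(gap); top = running max
  -- all_gaps = list(zip(gap_ids, gap_descs))
  let all_gaps := pvGapIds.zip pvGapDescs
  let bt := all_gaps.foldl (fun s gap =>
      (s.1.modify ((flat.count gap.1 : Int)) [] (fun l => l ++ [gap]),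
       if (flat.count gap.1 : Int) > s.2 then (flat.count gap.1 : Int) else s.2))
    ((PySem.Dict.empty : PySem.Dict Int (List (String × String))), (0 : Int))
  -- for k in range(top + 1): result.extend(buckets.get(k, []))
  (PySem.List.pyRange 0 (bt.2 + 1)).foldl (fun acc k => acc ++ bt.1.getD k []) []

-- ===== PRECONDITION & SPEC =====
-- Pre_ excludes exactly the states without a 'strategies_log' key, on which A raises KeyError.
def Pre_select_hypothesis_gaps (state : List (String × List (List (String × List String)))) : Prop :=
  (PySem.Dict.mk state).contains "strategies_log" = true
instance (state : List (String × List (List (String × List String)))) : Decidable (Pre_select_hypothesis_gaps state) := by unfold Pre_select_hypothesis_gaps; infer_instance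
def pvWitness_select_hypothesis_gaps : (List (String × List (List (String × List String)))) := [("strategies_log", [])]

def Spec_select_hypothesis_gaps (state : List (String × List (List (String × List String)))) (out : List (String × String)) : Prop := out = select_hypothesis_gaps_alt state
instance (state : List (String × List (List (String × List String)))) (out : List (String × String)) : Decidable (Spec_select_hypothesis_gaps state out) := by unfold Spec_select_hypothesis_gaps; infer_instance

-- ===== CLAIM (what is proved, stated in full; the proofs are below) =====
def Claim_equal_select_hypothesis_gaps : Prop := ∀ (state : List (String × List (List (String × List String)))), Dom_select_hypothesis_gaps state → Pre_select_hypothesis_gaps state → Spec_select_hypothesis_gaps state (select_hypothesis_gaps state)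

-- ===== LEMMAS AND PROOFS =====

-- inserting behind a prefix none of whose elements come strictly after x
lemma insertBy_append_not_before {α : Type} (before : α → α → Bool) (x : α) (l r : List α)
    (h : ∀ y ∈ l, before x y = false) :
    PySem.List.insertBy before x (l ++ r) = l ++ PySem.List.insertBy before x r := by
  induction l with
  | nil => simp
  | cons y ys ih =>
    simp only [List.cons_append, PySem.List.insertBy, h y (by simp), Bool.false_eq_true,
      if_false, List.cons.injEq, true_and]
    exact ih (fun z hz => h z (by simp [hz]))

-- inserting in front of a suffix all of whose elements come strictly after x
lemma insertBy_of_forall_before {α : Type} (before : α → α → Bool) (x : α) (r : List α)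
    (h : ∀ y ∈ r, before x y = true) :
    PySem.List.insertBy before x r = x :: r := by
  cases r with
  | nil => rfl
  | cons y ys => simp [PySem.List.insertBy, h y (by simp)]

-- Characterisation of Python's stable sort as concatenated count buckets:
-- bucket k (in ascending k) holds the elements of key k in original order.
lemma sorted_eq_flatMap_pyRange {α : Type} (key : α → Int) (xs : List α) :
    ∀ (a b : Int), (∀ x ∈ xs, a ≤ key x ∧ key x < b) →
    PySem.List.sorted xs key =
      (PySem.List.pyRange a b).flatMap (fun k => xs.filter (fun x => key x == k)) := by
  induction xs using List.reverseRecOn with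
  | nil =>
    intro a b _
    simp [PySem.List.sorted_eq_foldl_insertBy]
  | append_singleton xs x ih =>
    intro a b h
    have hx := h x (by simp)
    have hxs : ∀ y ∈ xs, a ≤ key y ∧ key y < b := fun y hy => h y (by simp [hy])
    rw [PySem.List.sorted_eq_foldl_insertBy, List.foldl_append, List.foldl_cons, List.foldl_nil,
      ← PySem.List.sorted_eq_foldl_insertBy, ih a b hxs]
    -- split the insertion side at key x + 1
    rw [PySem.List.pyRange_one_append a (key x + 1) b (by omega) (by omega), List.flatMap_append,
      List.flatMap_append]
    rw [insertBy_append_not_before _ _ _ _ (by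
      intro y hy
      rcases List.mem_flatMap.1 hy with ⟨k, hk, hyk⟩
      have hk' := (PySem.List.mem_pyRange_one.1 hk).2
      have : key y = k := by simpa using (List.mem_filter.1 hyk).2
      simp only [decide_eq_false_iff_not, not_lt]
      omega)]
    rw [insertBy_of_forall_before _ _ _ (by
      intro y hy
      rcases List.mem_flatMap.1 hy with ⟨k, hk, hyk⟩
      have hk' := (PySem.List.mem_pyRange_one.1 hk).1
      have : key y = k := by simpa using (List.mem_filter.1 hyk).2
      simp only [decide_eq_true_eq]
      omega)]
    -- on the bucket side the new element only lands in bucket (key x),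
    -- which is the last bucket of the low half
    have hhigh : (PySem.List.pyRange (key x + 1) b).flatMap (fun k => (xs ++ [x]).filter (fun y => key y == k))
        = (PySem.List.pyRange (key x + 1) b).flatMap (fun k => xs.filter (fun y => key y == k)) := by
      apply List.flatMap_congr
      intro k hk
      have := (PySem.List.mem_pyRange_one.1 hk).1
      simp only [List.filter_append, List.filter_cons, List.filter_nil]
      rw [show (key x == k) = false by simp; omega]
      simp
    have hlow : (PySem.List.pyRange a (key x + 1)).flatMap (fun k => (xs ++ [x]).filter (fun y => key y == k))
        = (PySem.List.pyRange a (key x + 1)).flatMap (fun k => xs.filter (fun y => key y == k)) ++ [x] := by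
      rw [PySem.List.pyRange_one_succ_right (by omega : a ≤ key x), List.flatMap_append,
        List.flatMap_append, List.flatMap_singleton, List.flatMap_singleton]
      have hcap : (PySem.List.pyRange a (key x)).flatMap (fun k => (xs ++ [x]).filter (fun y => key y == k))
          = (PySem.List.pyRange a (key x)).flatMap (fun k => xs.filter (fun y => key y == k)) := by
        apply List.flatMap_congr
        intro k hk
        have := (PySem.List.mem_pyRange_one.1 hk).2
        simp only [List.filter_append, List.filter_cons, List.filter_nil]
        rw [show (key x == k) = false by simp; omega]
        simp
      rw [hcap]
      simp [List.filter_append]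
    rw [hhigh, hlow]
    simp

-- A's nested counting loop counts occurrences across the flattened hypothesis lists
lemma pvTested_getD (log : List (List (String × List String))) (d : PySem.Dict String Int) (v : String) :
    (log.foldl (fun d entry =>
        ((PySem.Dict.mk entry).getD "hypothesis_ids" []).foldl
          (fun d hyp => d.insert hyp (d.getD hyp 0 + 1)) d) d).getD v 0
      = d.getD v 0 + ((log.flatMap (fun e => (PySem.Dict.mk e).getD "hypothesis_ids" [])).count v : Int) := by
  induction log generalizing d with
  | nil => simp
  | cons e t iht =>
    rw [List.foldl_cons, iht, PySem.Dict.getD_foldl_insert_add_one]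
    simp [List.count_append]
    omega

-- buckets built by setdefault/append: bucket k holds the key-k elements in order
lemma buckets_getD {α : Type} (key : α → Int) (gs : List α) (k : Int) :
    (gs.foldl (fun d g => PySem.Dict.modify d (key g) [] (fun l => l ++ [g])) PySem.Dict.empty).getD k []
      = gs.filter (fun g => key g == k) := by
  rw [show (gs.foldl (fun d g => PySem.Dict.modify d (key g) [] (fun l => l ++ [g])) PySem.Dict.empty)
      = ((gs.map (fun g => (key g, g))).foldl
          (fun d p => PySem.Dict.modify d p.1 [] (fun l => l ++ [p.2])) PySem.Dict.empty) from
    (List.foldl_map (f := fun g => (key g, g))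
      (g := fun d p => PySem.Dict.modify d p.1 [] (fun l => l ++ [p.2]))
      (l := gs) (init := PySem.Dict.empty)).symm]
  rw [PySem.Dict.getD_foldl_modify_append]
  simp [List.filter_map, List.map_map, Function.comp_def]

-- ===== VERDICT (by name: the statement is the Claim_ definition above) =====
theorem select_hypothesis_gaps_spec : Claim_equal_select_hypothesis_gaps := by
  intro state _hdom _hpre
  unfold Spec_select_hypothesis_gaps select_hypothesis_gaps select_hypothesis_gaps_alt
  dsimp only
  have hzip : pvGapIds.zip pvGapDescs = pvAllGaps := by rfl
  rw [hzip]
  -- B's flat list is the flattened log, and A's dict lookup is its count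
  have hfl : (pvLog state).foldl (fun acc entry => acc ++ (PySem.Dict.mk entry).getD "hypothesis_ids" []) []
      = (pvLog state).flatMap (fun e => (PySem.Dict.mk e).getD "hypothesis_ids" []) := by
    rw [PySem.List.foldl_append_eq_flatMap, List.nil_append]
  rw [hfl]
  set flat := (pvLog state).flatMap (fun e => (PySem.Dict.mk e).getD "hypothesis_ids" []) with hflat
  have hkey : (fun x : String × String => (pvTested (pvLog state)).getD x.1 0)
      = fun x => ((flat.count x.1 : Int)) := by
    funext x
    unfold pvTested
    rw [pvTested_getD, hflat]
    simp
  rw [hkey]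
  rw [PySem.List.foldl_prod_mk
      (f := fun (d : PySem.Dict Int (List (String × String))) (gap : String × String) =>
        PySem.Dict.modify d ((flat.count gap.1 : Int)) [] (fun l => l ++ [gap]))
      (g := fun (t : Int) (gap : String × String) =>
        if ((flat.count gap.1 : Int)) > t then ((flat.count gap.1 : Int)) else t)]
  dsimp only
  -- the running max is a fold of max
  have hmax : (fun (t : Int) (gap : String × String) =>
      if ((flat.count gap.1 : Int)) > t then ((flat.count gap.1 : Int)) else t)
      = fun t gap => max t ((flat.count gap.1 : Int)) := by
    funext t gap
    simp [max_def]
    omega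
  rw [hmax]
  have htop := PySem.List.le_foldl_max_int pvAllGaps (fun g => ((flat.count g.1 : Int))) 0
  set top := pvAllGaps.foldl (fun acc y => max acc ((flat.count y.1 : Int))) 0 with htopdef
  have hb := buckets_getD (fun g : String × String => ((flat.count g.1 : Int))) pvAllGaps
  rw [PySem.List.foldl_append_eq_flatMap, List.nil_append]
  rw [sorted_eq_flatMap_pyRange (fun g : String × String => ((flat.count g.1 : Int))) pvAllGaps 0 (top + 1) (by
    intro g hg
    show (0:Int) ≤ ((flat.count g.1 : Int)) ∧ ((flat.count g.1 : Int)) < top + 1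
    refine ⟨by positivity, ?_⟩
    have h2 : ((flat.count g.1 : Int)) ≤ top := htop.2 g hg
    omega)]
  exact List.flatMap_congr (fun k _ => (hb k).symm)
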